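-- pv_equiv track=rewrite | github.com/v0rt3xh/LeetCode | BitOP/numberComplement.py | findComplement
-- ===== SOURCE A (Python) =====
-- def findComplement(num: int) -> int:
--     base = 1
--     res = 0
--     while num:
--         value = 0 if num % 2 else 1
--         res += base * value
--         base *= 2
--         num = num >> 1
--     return res
-- ===== SOURCE B (Python) =====
-- def findComplement(num: int) -> int:
--     return num ^ ((1 << num.bit_length()) - 1)
-- ===== Notes on version B (the rewrite author's own statement) =====
-- stated objective: idiomatic
-- what changed: Replaces A's per-bit while-loop accumulation with a single XOR against an all-ones mask sized by bit_length.
import Mathlib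
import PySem

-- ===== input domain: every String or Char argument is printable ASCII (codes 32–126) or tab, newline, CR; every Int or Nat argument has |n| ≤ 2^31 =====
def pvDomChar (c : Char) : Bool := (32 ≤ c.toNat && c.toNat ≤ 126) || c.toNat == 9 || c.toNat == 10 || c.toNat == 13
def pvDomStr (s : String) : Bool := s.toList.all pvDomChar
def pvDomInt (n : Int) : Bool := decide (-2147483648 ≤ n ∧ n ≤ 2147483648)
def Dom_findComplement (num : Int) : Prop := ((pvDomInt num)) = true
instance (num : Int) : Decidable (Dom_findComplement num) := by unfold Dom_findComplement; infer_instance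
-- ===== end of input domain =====

-- B replaces A's per-bit accumulation loop with a single XOR against an
-- all-ones mask of num's bit length (idiomatic closed form, same values).

-- ===== PORT A =====
-- The Python while-loop, transliterated as structural recursion on the shrinking num.
-- Guard `0 < num` instead of `num ≠ 0` only totalizes it: Python's loop never
-- terminates for negative num (those inputs are outside Pre_), and for num ≥ 0
-- the two conditions coincide.
def findComplementLoop (num base res : Int) : Int :=
  if h : 0 < num then
    findComplementLoop (PySem.Int.floordiv num 2) (base * 2)
      (res + base * (if PySem.Int.mod num 2 ≠ 0 then 0 else 1))
  else res
termination_by num.toNat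
decreasing_by
  have h2 : PySem.Int.floordiv num 2 = num / 2 := PySem.Int.floordiv_eq_ediv_of_pos (by omega)
  rw [h2]; omega

def findComplement (num : Int) : Int := findComplementLoop num 1 0

-- ===== PORT B =====
def findComplement_alt (num : Int) : Int :=
  PySem.Int.bxor num (((1 : Int) <<< PySem.Int.bitLength num) - 1)

-- ===== PRECONDITION & SPEC =====
-- Pre_ excludes negative num, on which Python A never returns (its while-loop
-- diverges: an arithmetic right shift of a negative int never reaches 0).
def Pre_findComplement (num : Int) : Prop := 0 ≤ num
instance (num : Int) : Decidable (Pre_findComplement num) := by unfold Pre_findComplement; infer_instance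
def pvWitness_findComplement : Int := (5)

def Spec_findComplement (num : Int) (out : Int) : Prop := out = findComplement_alt num
instance (num : Int) (out : Int) : Decidable (Spec_findComplement num out) := by unfold Spec_findComplement; infer_instance

-- ===== CLAIM (what is proved, stated in full; the proofs are below) =====
def Claim_equal_findComplement : Prop := ∀ (num : Int), Dom_findComplement num → Pre_findComplement num → Spec_findComplement num (findComplement num)

-- ===== LEMMAS AND PROOFS =====

-- All-ones mask XOR is subtraction from the mask (general Nat fact).
theorem xor_mask (L n : Nat) (h : n < 2^L) : (2^L - 1) ^^^ n = 2^L - 1 - n := by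
  apply Nat.eq_of_testBit_eq
  intro i
  have h1 : Nat.testBit (2^L - 1) i = decide (i < L) := Nat.testBit_two_pow_sub_one L i
  have h2 : Nat.testBit (2^L - (n+1)) i = (decide (i < L) && !Nat.testBit n i) :=
    Nat.testBit_two_pow_sub_succ h i
  rw [Nat.testBit_xor, h1]
  have e : 2^L - 1 - n = 2^L - (n+1) := by omega
  rw [e, h2]
  by_cases hi : i < L
  · simp [hi]
  · have hle : L ≤ i := Nat.le_of_not_lt hi
    have hn : n < 2^i := lt_of_lt_of_le h (Nat.pow_le_pow_right (by norm_num) hle)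
    simp [hi, Nat.testBit_lt_two_pow hn]

-- A's loop computes mask-minus-n, scaled by base and shifted by res.
theorem loop_eq (n : Nat) : ∀ (base res : Int),
    findComplementLoop (n : Int) base res
      = res + base * ((2 ^ PySem.Int.bitLength (n : Int) - 1 - n : Nat) : Int) := by
  induction n using Nat.strong_induction_on with
  | _ n ih =>
    intro base res
    by_cases h0 : 0 < n
    · rw [findComplementLoop]
      have hpos : (0 : Int) < (n : Int) := by exact_mod_cast h0
      rw [dif_pos hpos]
      have hfd : PySem.Int.floordiv (n : Int) 2 = ((n / 2 : Nat) : Int) := by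
        exact_mod_cast PySem.Int.floordiv_natCast n 2
      have hmd : PySem.Int.mod (n : Int) 2 = ((n % 2 : Nat) : Int) := by
        exact_mod_cast PySem.Int.mod_natCast n 2
      rw [hfd, hmd, ih (n / 2) (Nat.div_lt_self h0 (by norm_num))]
      have hL : PySem.Int.bitLength (n : Int)
          = PySem.Int.bitLength ((n / 2 : Nat) : Int) + 1 := PySem.Int.bitLength_natCast h0
      set L := PySem.Int.bitLength ((n / 2 : Nat) : Int) with hLdef
      have hlt : n / 2 < 2 ^ L := by
        have := PySem.Int.lt_two_pow_bitLength ((n / 2 : Nat) : Int)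
        simpa using this
      have hn2 : n < 2 ^ (L + 1) := by
        have : n ≤ 2 * (n / 2) + 1 := by omega
        calc n ≤ 2 * (n / 2) + 1 := this
          _ < 2 ^ (L + 1) := by rw [pow_succ]; omega
      rw [hL]
      rcases Nat.mod_two_eq_zero_or_one n with hp | hp
      · rw [if_neg (by simp [hp])]
        have h1 : (2 ^ (L+1) - 1 - n : Nat) = 2 * (2 ^ L - 1 - (n/2)) + 1 := by
          have hps : 2 ^ (L+1) = 2 * 2 ^ L := by rw [pow_succ]; ring
          omega
        rw [h1]; push_cast; ring
      · rw [if_pos (by simp [hp])]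
        have h1 : (2 ^ (L+1) - 1 - n : Nat) = 2 * (2 ^ L - 1 - (n/2)) := by
          have hps : 2 ^ (L+1) = 2 * 2 ^ L := by rw [pow_succ]; ring
          omega
        rw [h1]; push_cast; ring
    · have hn : n = 0 := by omega
      subst hn
      rw [findComplementLoop, dif_neg (by norm_num)]
      simp [PySem.Int.bitLength_zero]

-- ===== VERDICT (by name: the statement is the Claim_ definition above) =====
theorem findComplement_spec : Claim_equal_findComplement := by
  intro num _ hpre
  have hnum : num = ((num.toNat : Nat) : Int) := by
    exact (Int.toNat_of_nonneg hpre).symm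
  unfold Spec_findComplement findComplement findComplement_alt
  set n := num.toNat with hn
  rw [hnum, loop_eq n 1 0]
  set L := PySem.Int.bitLength ((n : Nat) : Int) with hL
  have hlt : n < 2 ^ L := by
    have := PySem.Int.lt_two_pow_bitLength ((n : Nat) : Int)
    simpa using this
  have hshift : ((1 : Int) <<< L) = ((2 ^ L : Nat) : Int) := by
    rw [Int.shiftLeft_eq]; push_cast; ring
  rw [hshift]
  have hm : ((2 ^ L : Nat) : Int) - 1 = (((2 ^ L - 1 : Nat) : Nat) : Int) := by
    push_cast [Nat.one_le_two_pow]; ring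
  rw [hm, PySem.Int.bxor_natCast]
  rw [Nat.xor_comm, xor_mask L n hlt]
  simp
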